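-- pv_equiv track=rewrite | github.com/ShaquallLee/PythonAutoTest | myAlgorithms/DP/coin_add.py | coinAdd
-- ===== SOURCE A (Python) =====
-- def coinAdd(coins, index, rest):
--     '''
--     普通递归'''
--     if rest < 0:
--         return -1
--     if rest == 0:
--         return 0
--     if index >= len(coins):
--         return -1
--
--     r1 = coinAdd(coins, index+1, rest)
--     r2 = coinAdd(coins, index+1, rest-coins[index])
--     if r1 == -1 and r2 == -1:
--         return -1
--     else:
--         if r1 == -1:
--             return 1+r2
--         if r2 == -1:
--             return r1
--         return min(r1, 1+r2)
-- ===== SOURCE B (Python) =====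
-- def coinAdd(coins, index, rest):
--     """Top-down DP memoizing (position, remaining) states; identical results."""
--     n = len(coins)
--     memo = {}
--
--     def solve(i, r):
--         if r < 0:
--             return -1
--         if r == 0:
--             return 0
--         if i >= n:
--             return -1
--         key = (i, r)
--         if key in memo:
--             return memo[key]
--         c = coins[i]
--         skip = solve(i + 1, r)
--         take = solve(i + 1, r - c)
--         if take != -1:
--             best = take + 1 if skip == -1 else min(skip, take + 1)
--         else:
--             best = skip
--         memo[key] = best
--         return best
--
--     return solve(index, rest)
-- ===== Notes on version B (the rewrite author's own statement) =====
-- stated objective: alternative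
-- what changed: replaced the plain branching recursion by a top-down dynamic program memoizing (index, rest) states in a dict, so each distinct state is solved once; with few distinct remaining values (small or duplicate-heavy coins) this collapses the exponential tree, though on random large-rest inputs the state space itself is large
import Mathlib
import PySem

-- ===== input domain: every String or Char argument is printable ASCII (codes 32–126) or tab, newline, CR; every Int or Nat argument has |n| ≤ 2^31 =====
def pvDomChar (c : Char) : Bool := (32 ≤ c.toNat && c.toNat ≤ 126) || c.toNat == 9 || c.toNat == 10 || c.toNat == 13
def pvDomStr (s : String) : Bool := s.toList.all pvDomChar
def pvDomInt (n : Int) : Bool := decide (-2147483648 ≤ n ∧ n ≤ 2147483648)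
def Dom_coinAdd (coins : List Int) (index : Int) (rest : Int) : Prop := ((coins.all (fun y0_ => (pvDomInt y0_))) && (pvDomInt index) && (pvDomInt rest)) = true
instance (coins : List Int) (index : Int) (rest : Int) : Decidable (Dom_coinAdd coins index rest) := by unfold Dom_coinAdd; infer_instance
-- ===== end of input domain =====

-- B replaces A's plain branching recursion by top-down memoization over (index, rest) states (objective: alternative).

-- ===== PORT A =====
-- Literal port of A's recursion; coins[index] is Python indexing: PySem.List.pyGetD
-- (the default 0 is only reached outside Pre_coinAdd, where the Python raises IndexError).
def coinAdd (coins : List Int) (index : Int) (rest : Int) : Int :=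
  if rest < 0 then -1
  else if rest = 0 then 0
  else if (coins.length : Int) ≤ index then -1
  else
    let r1 := coinAdd coins (index + 1) rest
    let r2 := coinAdd coins (index + 1) (rest - PySem.List.pyGetD coins index 0)
    if r1 = -1 ∧ r2 = -1 then -1
    else if r1 = -1 then 1 + r2
    else if r2 = -1 then r1
    else min r1 (1 + r2)
termination_by ((coins.length : Int) - index).toNat
decreasing_by all_goals omega

-- ===== PORT B =====
-- Port of Source B's inner `solve`: same recursion threaded through a memo dict (state-passing style).
def coinSolve (coins : List Int) (i : Int) (r : Int) (memo : PySem.Dict (Int × Int) Int) :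
    Int × PySem.Dict (Int × Int) Int :=
  if r < 0 then (-1, memo)
  else if r = 0 then (0, memo)
  else if (coins.length : Int) ≤ i then (-1, memo)
  else
    match memo.get? (i, r) with
    | some v => (v, memo)
    | none =>
      let c := PySem.List.pyGetD coins i 0
      let s1 := coinSolve coins (i + 1) r memo
      let s2 := coinSolve coins (i + 1) (r - c) s1.2
      let best := if s2.1 ≠ -1 then (if s1.1 = -1 then s2.1 + 1 else min s1.1 (s2.1 + 1)) else s1.1
      (best, s2.2.insert (i, r) best)
termination_by ((coins.length : Int) - i).toNat
decreasing_by all_goals omega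

def coinAdd_alt (coins : List Int) (index : Int) (rest : Int) : Int :=
  (coinSolve coins index rest PySem.Dict.empty).1

-- ===== PRECONDITION & SPEC =====
-- Pre_ excludes exactly the inputs where Python A raises (IndexError / RecursionError):
-- rest > 0 together with index < -len(coins), where coins[index] is out of range.  B raises there too.
def Pre_coinAdd (coins : List Int) (index : Int) (rest : Int) : Prop :=
  rest ≤ 0 ∨ -(coins.length : Int) ≤ index
instance (coins : List Int) (index : Int) (rest : Int) : Decidable (Pre_coinAdd coins index rest) := by unfold Pre_coinAdd; infer_instance
def pvWitness_coinAdd : List Int × Int × Int := ([1, 2, 5], 0, 8)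

def Spec_coinAdd (coins : List Int) (index : Int) (rest : Int) (out : Int) : Prop := out = coinAdd_alt coins index rest
instance (coins : List Int) (index : Int) (rest : Int) (out : Int) : Decidable (Spec_coinAdd coins index rest out) := by unfold Spec_coinAdd; infer_instance

-- ===== CLAIM (what is proved, stated in full; the proofs are below) =====
def Claim_equal_coinAdd : Prop := ∀ (coins : List Int) (index : Int) (rest : Int), Dom_coinAdd coins index rest → Pre_coinAdd coins index rest → Spec_coinAdd coins index rest (coinAdd coins index rest)

-- ===== LEMMAS AND PROOFS =====

-- memo invariant: every cached value is A's value for that state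
def MemoOK (coins : List Int) (m : PySem.Dict (Int × Int) Int) : Prop :=
  ∀ p v, m.get? p = some v → v = coinAdd coins p.1 p.2

-- B's combination of (skip, take) equals A's four-way branch
theorem combine_eq (a b : Int) :
    (if b ≠ -1 then (if a = -1 then b + 1 else min a (b + 1)) else a) =
    (if a = -1 ∧ b = -1 then -1 else if a = -1 then 1 + b else if b = -1 then a else min a (1 + b)) := by
  split_ifs <;> omega

theorem coinSolve_correct (coins : List Int) :
    ∀ (n : ℕ) (i r : Int) (m : PySem.Dict (Int × Int) Int),
      ((coins.length : Int) - i).toNat = n → MemoOK coins m →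
      (coinSolve coins i r m).1 = coinAdd coins i r ∧ MemoOK coins (coinSolve coins i r m).2 := by
  intro n
  induction n using Nat.strong_induction_on with
  | _ n ih =>
    intro i r m hn hm
    by_cases h1 : r < 0
    · rw [coinSolve, coinAdd, if_pos h1, if_pos h1]; exact ⟨rfl, hm⟩
    by_cases h2 : r = 0
    · rw [coinSolve, coinAdd, if_neg h1, if_neg h1, if_pos h2, if_pos h2]; exact ⟨rfl, hm⟩
    by_cases h3 : (coins.length : Int) ≤ i
    · rw [coinSolve, coinAdd, if_neg h1, if_neg h1, if_neg h2, if_neg h2, if_pos h3, if_pos h3]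
      exact ⟨rfl, hm⟩
    -- recursive case: 0 < r and i < len
    have hlt : ((coins.length : Int) - (i + 1)).toNat < n := by omega
    obtain ⟨e1, m1ok⟩ := ih _ hlt (i + 1) r m rfl hm
    obtain ⟨e2, m2ok⟩ := ih _ hlt (i + 1) (r - PySem.List.pyGetD coins i 0)
      (coinSolve coins (i + 1) r m).2 rfl m1ok
    have hbest :
        (if (coinSolve coins (i + 1) (r - PySem.List.pyGetD coins i 0)
              (coinSolve coins (i + 1) r m).2).1 ≠ -1 then
          (if (coinSolve coins (i + 1) r m).1 = -1 then
            (coinSolve coins (i + 1) (r - PySem.List.pyGetD coins i 0)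
              (coinSolve coins (i + 1) r m).2).1 + 1
          else min (coinSolve coins (i + 1) r m).1
            ((coinSolve coins (i + 1) (r - PySem.List.pyGetD coins i 0)
              (coinSolve coins (i + 1) r m).2).1 + 1))
        else (coinSolve coins (i + 1) r m).1) = coinAdd coins i r := by
      rw [e1, e2]
      conv_rhs => rw [coinAdd]
      rw [if_neg h1, if_neg h2, if_neg h3]
      exact combine_eq _ _
    cases hget : m.get? (i, r) with
    | some v =>
      rw [coinSolve, if_neg h1, if_neg h2, if_neg h3, hget]
      exact ⟨hm (i, r) v hget, hm⟩
    | none =>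
      rw [coinSolve, if_neg h1, if_neg h2, if_neg h3, hget]
      refine ⟨hbest, ?_⟩
      intro p v hpv
      simp only at hpv
      rw [PySem.Dict.get?_insert] at hpv
      by_cases hp : p = (i, r)
      · rw [if_pos hp] at hpv
        injection hpv with hv
        subst hp
        rw [← hv]
        exact hbest
      · rw [if_neg hp] at hpv
        exact m2ok p v hpv

-- ===== VERDICT (by name: the statement is the Claim_ definition above) =====
theorem coinAdd_spec : Claim_equal_coinAdd := by
  intro coins index rest _ _
  unfold Spec_coinAdd coinAdd_alt
  have h := coinSolve_correct coins (((coins.length : Int) - index).toNat) index rest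
    PySem.Dict.empty rfl (by intro p v h; simp [PySem.Dict.get?_empty] at h)
  exact h.1.symm
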